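-- pv_equiv track=rewrite | github.com/scottonanski/persistent-mind-model | pmm/meta_reflection.py | _extract_common_themes
-- ===== SOURCE A (Python) =====
-- from typing import List, Dict, Optional, Any
--
-- def _extract_common_themes(texts: List[str]) -> List[str]:
--     """Extract common themes from a cluster of similar texts."""
--     # Simple word frequency analysis
--     word_freq = {}
--     stop_words = {
--         "the",
--         "a",
--         "an",
--         "and",
--         "or",
--         "but",
--         "in",
--         "on",
--         "at",
--         "to",
--         "for",
--         "of",
--         "with",
--         "by",
--         "is",
--         "are",
--         "was",
--         "were",
--         "be",
--         "been",
--         "being",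
--         "have",
--         "has",
--         "had",
--         "do",
--         "does",
--         "did",
--         "will",
--         "would",
--         "could",
--         "should",
--         "may",
--         "might",
--         "can",
--         "this",
--         "that",
--         "these",
--         "those",
--     }
--
--     for text in texts:
--         words = text.lower().split()
--         for word in words:
--             word = word.strip('.,!?;:"()[]{}')
--             if len(word) > 3 and word not in stop_words:
--                 word_freq[word] = word_freq.get(word, 0) + 1
--
--     # Return most frequent words
--     return sorted(word_freq.keys(), key=lambda w: word_freq[w], reverse=True)
-- ===== SOURCE B (Python) =====
-- def _extract_common_themes(texts):
--     """Extract common themes from a cluster of similar texts."""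
--     stop_words = {
--         "the", "a", "an", "and", "or", "but", "in", "on", "at", "to", "for",
--         "of", "with", "by", "is", "are", "was", "were", "be", "been", "being",
--         "have", "has", "had", "do", "does", "did", "will", "would", "could",
--         "should", "may", "might", "can", "this", "that", "these", "those",
--     }
--     # one flat pass of tokenization, then counting with the same filter
--     words = [w.strip('.,!?;:"()[]{}') for text in texts for w in text.lower().split()]
--     counts = {}
--     for w in words:
--         if len(w) > 3 and w not in stop_words:
--             counts[w] = counts.get(w, 0) + 1
--     if not counts:
--         return []
--     # counting-sort sweep: walk frequencies from the maximum down to 1,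
--     # emitting words of each frequency in first-seen order (= stable ties)
--     maxf = max(counts.values())
--     out = []
--     for c in range(maxf, 0, -1):
--         out.extend(w for w, k in counts.items() if k == c)
--     return out
-- ===== Notes on version B (the rewrite author's own statement) =====
-- stated objective: alternative
-- what changed: Tokenization becomes one flat comprehension and Python's stable reverse sort of the count-dict keys is replaced by a counting-sort sweep that walks frequencies from the maximum down to 1, emitting each frequency's words in first-seen order.
import Mathlib
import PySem

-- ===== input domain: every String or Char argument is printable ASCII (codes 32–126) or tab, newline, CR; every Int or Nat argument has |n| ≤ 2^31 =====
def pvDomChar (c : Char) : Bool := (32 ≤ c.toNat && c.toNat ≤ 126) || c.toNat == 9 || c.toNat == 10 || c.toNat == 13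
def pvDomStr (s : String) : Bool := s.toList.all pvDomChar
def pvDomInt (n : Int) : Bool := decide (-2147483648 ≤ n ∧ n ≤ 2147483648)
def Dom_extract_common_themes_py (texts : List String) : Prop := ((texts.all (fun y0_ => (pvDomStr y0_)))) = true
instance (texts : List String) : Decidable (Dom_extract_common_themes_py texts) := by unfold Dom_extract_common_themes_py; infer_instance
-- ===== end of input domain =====

-- B replaces A's comparison sort of the word-count keys by a counting-sort sweep over
-- frequencies from the maximum down to 1 (alternative algorithm, same observable result).

-- ===== PORT A =====
def pvPunct : String := ".,!?;:\"()[]{}"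

def pvStops : PySem.Set String := PySem.Set.ofList
  ["the", "a", "an", "and", "or", "but", "in", "on", "at", "to", "for",
   "of", "with", "by", "is", "are", "was", "were", "be", "been", "being",
   "have", "has", "had", "do", "does", "did", "will", "would", "could",
   "should", "may", "might", "can", "this", "that", "these", "those"]

def extract_common_themes_py (texts : List String) : List String :=
  let word_freq : PySem.Dict String Int :=
    texts.foldl (fun d text =>
      (PySem.Str.split₀ (PySem.Str.lower text)).foldl (fun d w =>
        let word := PySem.Str.stripChars w pvPunct
        if 3 < PySem.Str.len word ∧ word ∉ pvStops then
          d.insert word (d.getD word 0 + 1)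
        else d) d) PySem.Dict.empty
  PySem.List.sorted word_freq.keys (fun w => word_freq.getD w 0) true

-- ===== PORT B =====
def extract_common_themes_py_alt (texts : List String) : List String :=
  let words : List String :=
    texts.flatMap (fun text =>
      (PySem.Str.split₀ (PySem.Str.lower text)).map (fun w => PySem.Str.stripChars w pvPunct))
  let counts : PySem.Dict String Int :=
    words.foldl (fun d w =>
      if 3 < PySem.Str.len w ∧ w ∉ pvStops then d.insert w (d.getD w 0 + 1) else d)
      PySem.Dict.empty
  if counts.size = 0 then []
  else
    match PySem.List.max? counts.values (fun v => v) with
    | none => []   -- unreachable: counts is nonempty here (totalizes Python's max())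
    | some maxf =>
      (PySem.List.pyRange maxf 0 (-1)).foldl
        (fun out c => out ++ (counts.items.filter (fun p => p.2 == c)).map (fun p => p.1)) []

-- ===== PRECONDITION & SPEC =====
def Spec_extract_common_themes_py (texts : List String) (out : List String) : Prop := out = extract_common_themes_py_alt texts
instance (texts : List String) (out : List String) : Decidable (Spec_extract_common_themes_py texts out) := by unfold Spec_extract_common_themes_py; infer_instance

-- ===== CLAIM (what is proved, stated in full; the proofs are below) =====
def Claim_equal_extract_common_themes_py : Prop := ∀ (texts : List String), Dom_extract_common_themes_py texts → Spec_extract_common_themes_py texts (extract_common_themes_py texts)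

-- ===== LEMMAS AND PROOFS =====

theorem insertBy_append_of_not_before {α : Type} (bef : α → α → Bool) (x : α)
    (ys zs : List α) (h : ∀ y ∈ ys, bef x y = false) :
    PySem.List.insertBy bef x (ys ++ zs) = ys ++ PySem.List.insertBy bef x zs := by
  induction ys with
  | nil => simp
  | cons y ys ih =>
    have hy : bef x y = false := h y (by simp)
    simp only [List.cons_append, PySem.List.insertBy, hy, Bool.false_eq_true, if_false]
    rw [ih (fun y hy => h y (by simp [hy]))]

theorem insertBy_of_forall_before {α : Type} (bef : α → α → Bool) (x : α)
    (zs : List α) (h : ∀ z ∈ zs, bef x z = true) :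
    PySem.List.insertBy bef x zs = x :: zs := by
  cases zs with
  | nil => rfl
  | cons z zs => simp [PySem.List.insertBy, h z (by simp)]

theorem ins_buckets {α : Type} (f : α → Int) (x : α) (l : List α) (cs : List Int)
    (hdec : cs.Pairwise (fun a b => b < a)) (hx : f x ∈ cs) :
    PySem.List.insertBy (fun a b => decide (f b < f a)) x
        (cs.flatMap (fun c => l.filter (fun y => f y == c)))
      = cs.flatMap (fun c => (l ++ [x]).filter (fun y => f y == c)) := by
  induction cs with
  | nil => cases hx
  | cons c cs ih =>
    rcases List.pairwise_cons.mp hdec with ⟨hc, hdec'⟩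
    by_cases hfx : f x = c
    · have h1 : ∀ y ∈ l.filter (fun y => f y == c), (fun a b => decide (f b < f a)) x y = false := by
        intro y hy
        have : f y = c := by simpa using (List.of_mem_filter hy)
        simp [this, hfx]
      have h2 : ∀ z ∈ cs.flatMap (fun c => l.filter (fun y => f y == c)),
          (fun a b => decide (f b < f a)) x z = true := by
        intro z hz
        rcases List.mem_flatMap.mp hz with ⟨c', hc', hz'⟩
        have : f z = c' := by simpa using (List.of_mem_filter hz')
        have : f z < c := this ▸ hc c' hc'
        simp [hfx, this]
      rw [List.flatMap_cons, insertBy_append_of_not_before _ _ _ _ h1,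
          insertBy_of_forall_before _ _ _ h2]
      have hb : ∀ c' ∈ cs, (l ++ [x]).filter (fun y => f y == c') = l.filter (fun y => f y == c') := by
        intro c' hc'
        have : f x ≠ c' := by
          have := hc c' hc'; omega
        simp [List.filter_append, this]
      rw [List.flatMap_cons, List.flatMap_congr hb]
      simp [List.filter_append, hfx]
    · have hx' : f x ∈ cs := by
        rcases List.mem_cons.mp hx with h | h
        · exact absurd h hfx
        · exact h
      have hxc : f x < c := hc _ hx'
      have h1 : ∀ y ∈ l.filter (fun y => f y == c), (fun a b => decide (f b < f a)) x y = false := by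
        intro y hy
        have : f y = c := by simpa using (List.of_mem_filter hy)
        simp [this]; omega
      rw [List.flatMap_cons, insertBy_append_of_not_before _ _ _ _ h1, ih hdec' hx',
          List.flatMap_cons]
      have : (l ++ [x]).filter (fun y => f y == c) = l.filter (fun y => f y == c) := by
        simp [List.filter_append, hfx]
      rw [this]

theorem sorted_rev_eq_flatMap_buckets {α : Type} (f : α → Int) (l : List α) (cs : List Int)
    (hdec : cs.Pairwise (fun a b => b < a)) (hcov : ∀ y ∈ l, f y ∈ cs) :
    PySem.List.sorted l f true = cs.flatMap (fun c => l.filter (fun y => f y == c)) := by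
  induction l using List.reverseRecOn with
  | nil => simp [PySem.List.sorted]
  | append_singleton l a ih =>
    rw [PySem.List.sorted_rev_eq_foldl_insertBy, List.foldl_append,
        ← PySem.List.sorted_rev_eq_foldl_insertBy,
        ih (fun y hy => hcov y (by simp [hy]))]
    exact ins_buckets f a l cs hdec (hcov a (by simp))

theorem foldl_some_isSome {α κ : Type} [LT κ] [DecidableLT κ] (key : α → κ) (xs : List α) (m : α) :
    ∃ m', (xs.foldl (fun acc x =>
      match acc with
      | none => some x
      | some m => if key m < key x then some x else some m) (some m)) = some m' := by
  induction xs generalizing m with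
  | nil => exact ⟨m, rfl⟩
  | cons x xs ih =>
    simp only [List.foldl_cons]
    split
    · exact ih x
    · exact ih m

theorem max?_isSome_of_ne_nil {α κ : Type} [LT κ] [DecidableLT κ] (key : α → κ)
    (xs : List α) (h : xs ≠ []) : ∃ m, PySem.List.max? xs key = some m := by
  cases xs with
  | nil => exact absurd rfl h
  | cons x xs => exact foldl_some_isSome key xs x

-- the strictly decreasing frequency sweep range(maxf, 0, -1)
theorem pairwise_gt_countdown (maxf : Int) :
    (PySem.List.pyRange maxf 0 (-1)).Pairwise (fun a b => b < a) := by
  rw [PySem.List.pyRange_neg_one_eq_reverse]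
  exact List.pairwise_reverse.mpr (PySem.List.pairwise_lt_pyRange_one 1 (maxf + 1))

theorem extract_common_themes_py_eq (texts : List String) :
    extract_common_themes_py texts = extract_common_themes_py_alt texts := by
  unfold extract_common_themes_py extract_common_themes_py_alt
  simp only [List.foldl_flatMap, List.foldl_map]
  set step := fun (d : PySem.Dict String Int) (w : String) =>
    if 3 < PySem.Str.len w ∧ w ∉ pvStops then d.insert w (d.getD w 0 + 1) else d with hstep
  have hdicts :
      texts.foldl (fun d text =>
        (PySem.Str.split₀ (PySem.Str.lower text)).foldl (fun d w =>
          let word := PySem.Str.stripChars w pvPunct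
          if 3 < PySem.Str.len word ∧ word ∉ pvStops then
            d.insert word (d.getD word 0 + 1)
          else d) d) PySem.Dict.empty
      = texts.foldl (fun d text =>
          (PySem.Str.split₀ (PySem.Str.lower text)).foldl
            (fun d w => step d (PySem.Str.stripChars w pvPunct)) d) PySem.Dict.empty := rfl
  rw [hdicts]
  -- both sides now speak about the same flat token list
  set toks := texts.flatMap (fun text => (PySem.Str.split₀ (PySem.Str.lower text)).map
      (fun w => PySem.Str.stripChars w pvPunct)) with htoks
  have hfold : texts.foldl (fun d text =>
        (PySem.Str.split₀ (PySem.Str.lower text)).foldl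
          (fun d w => step d (PySem.Str.stripChars w pvPunct)) d) PySem.Dict.empty
      = toks.foldl step PySem.Dict.empty := by
    rw [htoks, List.foldl_flatMap]
    simp only [List.foldl_map]
  rw [hfold]
  -- the counting loop is the counter of the filtered token list
  have hcnt : toks.foldl step PySem.Dict.empty
      = PySem.Dict.counter (toks.filter (fun w => decide (3 < PySem.Str.len w ∧ w ∉ pvStops))) := by
    rw [hstep, PySem.List.foldl_ite_eq_foldl_filter,
        PySem.Dict.foldl_insert_getD_add_one_eq_counter]
  rw [hcnt]
  set ft := toks.filter (fun w => decide (3 < PySem.Str.len w ∧ w ∉ pvStops)) with hft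
  set W := PySem.Dict.counter ft with hW
  by_cases hsz : W.size = 0
  · -- empty dict: both sides are []
    have hitems : W.items = [] := List.length_eq_zero_iff.mp hsz
    have hkeys : W.keys = [] := by simp [PySem.Dict.keys, hitems]
    simp [hsz, hkeys, PySem.List.sorted]
  · simp only [hsz, if_false]
    have hitems : W.items ≠ [] := fun h => hsz (by simp [PySem.Dict.size, h])
    have hvals : W.values ≠ [] := by simp [PySem.Dict.values]; exact hitems
    rcases max?_isSome_of_ne_nil (fun v => v) W.values hvals with ⟨maxf, hmax⟩
    rw [hmax]
    dsimp only
    -- B's sweep is a flatMap over the countdown range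
    rw [PySem.List.foldl_append_eq_flatMap
        (fun c => (W.items.filter (fun p => p.2 == c)).map (fun p => p.1))
        (PySem.List.pyRange maxf 0 (-1)) []]
    simp only [List.nil_append]
    -- rewrite each bucket as a filter of the key list
    have hbucket : ∀ c : Int, (W.items.filter (fun p => p.2 == c)).map (fun p => p.1)
        = W.keys.filter (fun k => W.getD k 0 == c) := by
      intro c
      rw [hW, PySem.Dict.items_counter ft]
      rw [List.filter_map, List.map_map]
      simp only [Function.comp_def, PySem.Dict.keys_counter]
      simp [PySem.Dict.getD_counter]
    have hflat : (PySem.List.pyRange maxf 0 (-1)).flatMap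
          (fun c => (W.items.filter (fun p => p.2 == c)).map (fun p => p.1))
        = (PySem.List.pyRange maxf 0 (-1)).flatMap
          (fun c => W.keys.filter (fun k => W.getD k 0 == c)) :=
      List.flatMap_congr (fun c _ => hbucket c)
    rw [hflat]
    -- and conclude with the counting-sort characterisation of the stable reverse sort
    apply sorted_rev_eq_flatMap_buckets (fun w => W.getD w 0) W.keys
      (PySem.List.pyRange maxf 0 (-1)) (pairwise_gt_countdown maxf)
    intro k hk
    rw [PySem.List.mem_pyRange_neg_one]
    have hkft : k ∈ ft := by
      rw [hW, PySem.Dict.keys_counter] at hk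
      exact (PySem.Set.mem_ofList ft k).mp hk
    have hpos : 0 < ft.count k := List.count_pos_iff.mpr hkft
    have hgetD : W.getD k 0 = ((ft.count k : Int)) := PySem.Dict.getD_counter ft k
    constructor
    · rw [hgetD]; exact_mod_cast hpos
    · -- the count of k is one of the values, hence ≤ maxf
      have hmem : W.getD k 0 ∈ W.values := by
        rw [hW, PySem.Dict.values, PySem.Dict.items_counter ft, List.map_map]
        rw [hgetD]
        simp only [Function.comp_def]
        exact List.mem_map.mpr ⟨k, (by rw [PySem.Dict.keys_counter ft] at hk; exact hk), rfl⟩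
      simpa using PySem.List.max?_isMax hmax _ hmem

-- ===== VERDICT (by name: the statement is the Claim_ definition above) =====
theorem extract_common_themes_py_spec : Claim_equal_extract_common_themes_py := by
  intro texts _
  unfold Spec_extract_common_themes_py
  exact extract_common_themes_py_eq texts
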